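-- pv_equiv track=rewrite | github.com/qchien04/PythonPTIT | Codeptitsolution/kiem_tra_so_dep.py | solve
-- ===== SOURCE A (Python) =====
-- def solve(n):
--     if n[0]==n[1]: return "NO"
--     else:
--         for i in range(2,len(n),2):
--             if n[i]!=n[i-2]:
--                 return "NO"
--         for i in range(3,len(n),2):
--             if n[i]!=n[i-2]:
--                 return "NO"
--     return "YES"
-- ===== SOURCE B (Python) =====
-- def solve(n):
--     if n[0] == n[1]:
--         return "NO"
--     pat = (n[:2] * (len(n) // 2 + 1))[:len(n)]
--     return "YES" if n == pat else "NO"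
-- ===== Notes on version B (the rewrite author's own statement) =====
-- stated objective: simpler
-- what changed: Instead of two index loops scanning even and odd positions, B builds the expected alternating pattern from the first two characters once and compares it to the whole input with a single equality test.
import Mathlib
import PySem

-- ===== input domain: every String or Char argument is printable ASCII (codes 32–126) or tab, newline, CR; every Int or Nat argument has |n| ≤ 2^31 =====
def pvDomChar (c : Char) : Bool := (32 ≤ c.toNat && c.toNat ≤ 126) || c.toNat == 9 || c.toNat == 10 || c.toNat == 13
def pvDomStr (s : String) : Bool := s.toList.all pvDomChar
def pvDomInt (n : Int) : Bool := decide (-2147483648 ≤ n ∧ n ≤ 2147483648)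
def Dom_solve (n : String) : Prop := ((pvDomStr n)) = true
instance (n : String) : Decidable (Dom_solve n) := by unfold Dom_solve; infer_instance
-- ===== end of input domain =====

-- B replaces A's two parity-indexed scanning loops by building the expected
-- alternating pattern from the first two characters and one equality test (objective: simpler).

-- ===== PORT A =====
-- Literal port of A: guard n[0]==n[1], then the two early-return loops over
-- range(2,len,2) and range(3,len,2) become List.any over the same ranges.
def solve (n : String) : String :=
  let cs := n.toList
  (((PySem.List.pyGet? cs 0).bind (fun c0 => (PySem.List.pyGet? cs 1).bind (fun c1 =>
    some (if c0 = c1 then "NO"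
      else if (PySem.List.pyRange 2 (cs.length : Int) 2).any
                (fun i => PySem.List.pyGet? cs i != PySem.List.pyGet? cs (i - 2)) then "NO"
      else if (PySem.List.pyRange 3 (cs.length : Int) 2).any
                (fun i => PySem.List.pyGet? cs i != PySem.List.pyGet? cs (i - 2)) then "NO"
      else "YES"))))).getD "NO"  -- the none case is unreachable under Pre_solve (IndexError on len < 2)

-- ===== PORT B =====
-- Literal port of B: pat = (n[:2] * (len(n)//2 + 1))[:len(n)]; compare n with pat.
def solve_alt (n : String) : String :=
  let cs := n.toList
  (((PySem.List.pyGet? cs 0).bind (fun c0 => (PySem.List.pyGet? cs 1).bind (fun c1 =>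
    some (if c0 = c1 then "NO"
      else
        let pat := PySem.List.slice
          (PySem.List.pyRepeat (PySem.List.slice cs none (some 2))
            (PySem.Int.floordiv (cs.length : Int) 2 + 1))
          none (some (cs.length : Int))
        if cs = pat then "YES" else "NO"))))).getD "NO"  -- none case unreachable under Pre_solve

-- ===== PRECONDITION & SPEC =====
-- Pre_ excludes strings of length < 2: there A (and B) raise IndexError on n[0]/n[1].
def Pre_solve (n : String) : Prop := 2 ≤ n.toList.length
instance (n : String) : Decidable (Pre_solve n) := by unfold Pre_solve; infer_instance
def pvWitness_solve : String := "ab"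
def Spec_solve (n : String) (out : String) : Prop := out = solve_alt n
instance (n : String) (out : String) : Decidable (Spec_solve n out) := by unfold Spec_solve; infer_instance

-- ===== CLAIM (what is proved, stated in full; the proofs are below) =====
def Claim_equal_solve : Prop := ∀ (n : String), Dom_solve n → Pre_solve n → Spec_solve n (solve n)

-- ===== LEMMAS AND PROOFS =====

-- A's stepwise condition (each position equals the one two before) forces the
-- closed alternating form, by strong induction on the index.
theorem pv_stepwise_to_closed (c0 c1 : Char) (cs : List Char)
    (h0 : cs[0]? = some c0) (h1 : cs[1]? = some c1)
    (hP : ∀ j, 2 ≤ j → j < cs.length → cs[j]? = cs[j - 2]?) :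
    ∀ i, i < cs.length → cs[i]? = some (if i % 2 = 0 then c0 else c1) := by
  intro i
  induction i using Nat.strong_induction_on with
  | _ i ih =>
    intro hi
    match i, ih with
    | 0, _ => simpa using h0
    | 1, _ => simpa using h1
    | (j+2), ih =>
      rw [hP (j+2) (by omega) hi]
      have := ih j (by omega) (by omega)
      simpa [Nat.add_mod_right] using this

-- Indexing into the flattened repetition of a two-element block.
theorem pv_flat_get (a b : Char) : ∀ (k i : Nat), i < 2 * k →
    ((List.replicate k [a, b]).flatten)[i]? = some (if i % 2 = 0 then a else b)
  | 0, i, h => by omega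
  | k+1, i, h => by
    simp only [List.replicate_succ, List.flatten_cons, List.cons_append, List.nil_append]
    match i with
    | 0 => simp
    | 1 => simp
    | (j+2) =>
      have := pv_flat_get a b k j (by omega)
      simpa [Nat.add_mod_right] using this

-- A's two `any`-loops are both mismatch-free iff every position ≥ 2 repeats the
-- one two earlier (the two ranges together cover exactly the indices 2 ≤ j < len).
theorem pv_anys_iff (cs : List Char) :
    (((PySem.List.pyRange 2 (cs.length : Int) 2).any
        (fun i => PySem.List.pyGet? cs i != PySem.List.pyGet? cs (i - 2))) = false ∧
     ((PySem.List.pyRange 3 (cs.length : Int) 2).any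
        (fun i => PySem.List.pyGet? cs i != PySem.List.pyGet? cs (i - 2))) = false)
    ↔ (∀ j : Nat, 2 ≤ j → j < cs.length → cs[j]? = cs[j - 2]?) := by
  simp only [List.any_eq_false, bne_iff_ne, ne_eq, not_not]
  constructor
  · rintro ⟨h2, h3⟩ j hj2 hjl
    have hget : PySem.List.pyGet? cs (j : Int) = PySem.List.pyGet? cs ((j : Int) - 2) := by
      rcases Nat.mod_two_eq_zero_or_one j with he | ho
      · exact h2 _ ((PySem.List.mem_pyRange_iff_of_pos (by norm_num) _).mpr
          ⟨by exact_mod_cast hj2, by exact_mod_cast hjl, by omega⟩)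
      · exact h3 _ ((PySem.List.mem_pyRange_iff_of_pos (by norm_num) _).mpr
          ⟨by omega, by exact_mod_cast hjl, by omega⟩)
    have e2 : ((j : Int) - 2) = ((j - 2 : Nat) : Int) := by omega
    rw [PySem.List.pyGet?_natCast, e2, PySem.List.pyGet?_natCast] at hget
    exact hget
  · intro h
    constructor <;>
    · intro i hi
      rw [PySem.List.mem_pyRange_iff_of_pos (by norm_num)] at hi
      obtain ⟨ha, hb, -⟩ := hi
      have hij : i = ((i.toNat : Nat) : Int) := by omega
      have e2 : ((i.toNat : Nat) : Int) - 2 = ((i.toNat - 2 : Nat) : Int) := by omega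
      rw [hij, e2, PySem.List.pyGet?_natCast, PySem.List.pyGet?_natCast]
      exact h i.toNat (by omega) (by omega)

-- B's pattern equality holds iff every position carries the closed alternating form.
theorem pv_alt_eq_iff (c0 c1 : Char) (rest : List Char) :
    (c0 :: c1 :: rest =
      PySem.List.slice
        (PySem.List.pyRepeat (PySem.List.slice (c0 :: c1 :: rest) none (some 2))
          (PySem.Int.floordiv ((c0 :: c1 :: rest).length : Int) 2 + 1))
        none (some ((c0 :: c1 :: rest).length : Int)))
    ↔ (∀ i, i < (c0 :: c1 :: rest).length →
        (c0 :: c1 :: rest)[i]? = some (if i % 2 = 0 then c0 else c1)) := by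
  set cs : List Char := c0 :: c1 :: rest with hcs
  set L : Nat := cs.length with hL
  have hL2 : 2 ≤ L := by simp [hL, hcs]
  have htwo : PySem.List.slice cs none (some 2) = [c0, c1] := by
    rw [show (2 : Int) = ((2 : Nat) : Int) from rfl, PySem.List.slice_to_natCast]
    simp [hcs]
  have hk : (PySem.Int.floordiv (L : Int) 2 + 1).toNat = L / 2 + 1 := by
    unfold PySem.Int.floordiv
    rw [Int.fdiv_eq_ediv]
    simp
    omega
  have hrep : PySem.List.pyRepeat (PySem.List.slice cs none (some 2))
      (PySem.Int.floordiv ((cs.length : Int)) 2 + 1)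
      = (List.replicate (L / 2 + 1) [c0, c1]).flatten := by
    rw [htwo]
    unfold PySem.List.pyRepeat
    rw [← hL, hk]
  have h2k : L < 2 * (L / 2 + 1) := by omega
  rw [hrep, PySem.List.slice_to _ (by positivity)]
  have hLt : ((L : Int)).toNat = L := by omega
  rw [hLt]
  have hflen : ((List.replicate (L / 2 + 1) [c0, c1]).flatten).length = 2 * (L / 2 + 1) := by
    simp [List.length_flatten, Nat.mul_comm]
  constructor
  · intro heq i hi
    rw [heq, List.getElem?_take, if_pos hi, pv_flat_get c0 c1 _ i (by omega)]
  · intro h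
    apply List.ext_getElem?
    intro i
    by_cases hi : i < L
    · rw [h i hi, List.getElem?_take, if_pos hi, pv_flat_get c0 c1 _ i (by omega)]
    · rw [List.getElem?_eq_none (by omega), List.getElem?_eq_none (by simp [hflen]; omega)]

-- ===== VERDICT (by name: the statement is the Claim_ definition above) =====
theorem solve_spec : Claim_equal_solve := by
  intro n _ hpre
  unfold Pre_solve at hpre
  unfold Spec_solve solve solve_alt
  obtain ⟨c0, c1, rest, hcs⟩ : ∃ c0 c1 rest, n.toList = c0 :: c1 :: rest := by
    match h : n.toList with
    | [] => rw [h] at hpre; simp at hpre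
    | [a] => rw [h] at hpre; simp at hpre
    | a :: b :: r => exact ⟨a, b, r, rfl⟩
  simp only [hcs]
  rw [show PySem.List.pyGet? (c0 :: c1 :: rest) 0 = some c0 by
        rw [show (0:Int) = ((0:Nat):Int) by norm_num, PySem.List.pyGet?_natCast]; rfl,
      show PySem.List.pyGet? (c0 :: c1 :: rest) 1 = some c1 by
        rw [show (1:Int) = ((1:Nat):Int) by norm_num, PySem.List.pyGet?_natCast]; rfl]
  simp only [Option.bind_some, Option.getD_some]
  by_cases hc : c0 = c1
  · simp [hc]
  · simp only [if_neg hc]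
    have h0 : (c0 :: c1 :: rest)[0]? = some c0 := rfl
    have h1 : (c0 :: c1 :: rest)[1]? = some c1 := rfl
    by_cases hpat : (∀ i, i < (c0 :: c1 :: rest).length →
        (c0 :: c1 :: rest)[i]? = some (if i % 2 = 0 then c0 else c1))
    · have hP : ∀ j : Nat, 2 ≤ j → j < (c0 :: c1 :: rest).length →
          (c0 :: c1 :: rest)[j]? = (c0 :: c1 :: rest)[j - 2]? := by
        intro j hj2 hjl
        rw [hpat j hjl, hpat (j - 2) (by omega)]
        have : (j - 2) % 2 = j % 2 := by omega
        rw [this]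
      obtain ⟨ha2, ha3⟩ := (pv_anys_iff (c0 :: c1 :: rest)).mpr hP
      rw [ha2, ha3, if_pos ((pv_alt_eq_iff c0 c1 rest).mpr hpat)]
      simp
    · have hnP : ¬ (((PySem.List.pyRange 2 ((c0 :: c1 :: rest).length : Int) 2).any
            (fun i => PySem.List.pyGet? (c0 :: c1 :: rest) i !=
              PySem.List.pyGet? (c0 :: c1 :: rest) (i - 2))) = false ∧
          ((PySem.List.pyRange 3 ((c0 :: c1 :: rest).length : Int) 2).any
            (fun i => PySem.List.pyGet? (c0 :: c1 :: rest) i !=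
              PySem.List.pyGet? (c0 :: c1 :: rest) (i - 2))) = false) := by
        intro hok
        exact hpat (pv_stepwise_to_closed c0 c1 _ h0 h1 ((pv_anys_iff _).mp hok))
      rw [if_neg (fun h => hpat ((pv_alt_eq_iff c0 c1 rest).mp h))]
      set b2 : Bool := (PySem.List.pyRange 2 ((c0 :: c1 :: rest).length : Int) 2).any
          (fun i => PySem.List.pyGet? (c0 :: c1 :: rest) i !=
            PySem.List.pyGet? (c0 :: c1 :: rest) (i - 2)) with hb2
      set b3 : Bool := (PySem.List.pyRange 3 ((c0 :: c1 :: rest).length : Int) 2).any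
          (fun i => PySem.List.pyGet? (c0 :: c1 :: rest) i !=
            PySem.List.pyGet? (c0 :: c1 :: rest) (i - 2)) with hb3
      clear_value b2 b3
      cases b2 <;> cases b3 <;> simp_all
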